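-- pv_equiv track=rewrite | github.com/bethenitro/GhostPass | senate/core/executive_secretary.py | _categorize_risk_flags
-- ===== SOURCE A (Python) =====
-- from typing import List, Dict, Any, Set, Optional
--
-- def _categorize_risk_flags(risk_flags: List[str]) -> Dict[str, List[str]]:
--     """
--     Categorize risk flags by type.
--
--     Args:
--         risk_flags: List of risk flags to categorize
--
--     Returns:
--         Dict mapping categories to risk flags
--     """
--     categories = {
--         "Security": [],
--         "Privacy": [],
--         "Compliance": [],
--         "Financial": [],
--         "Operational": [],
--         "Other": []
--     }
--
--     # Simple categorization based on keywords
--     for flag in risk_flags: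
--         flag_lower = flag.lower()
--
--         if any(keyword in flag_lower for keyword in ['security', 'vulnerability', 'breach', 'attack']):
--             categories["Security"].append(flag)
--         elif any(keyword in flag_lower for keyword in ['privacy', 'personal', 'data_protection']):
--             categories["Privacy"].append(flag)
--         elif any(keyword in flag_lower for keyword in ['compliance', 'regulation', 'legal', 'policy']):
--             categories["Compliance"].append(flag)
--         elif any(keyword in flag_lower for keyword in ['financial', 'fraud', 'money', 'payment']):
--             categories["Financial"].append(flag)
--         elif any(keyword in flag_lower for keyword in ['operational', 'system', 'performance']):
--             categories["Operational"].append(flag)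
--         else:
--             categories["Other"].append(flag)
--
--     # Remove empty categories
--     return {k: v for k, v in categories.items() if v}
-- ===== SOURCE B (Python) =====
-- _TABLE = [
--     ("Security", ['security', 'vulnerability', 'breach', 'attack']),
--     ("Privacy", ['privacy', 'personal', 'data_protection']),
--     ("Compliance", ['compliance', 'regulation', 'legal', 'policy']),
--     ("Financial", ['financial', 'fraud', 'money', 'payment']),
--     ("Operational", ['operational', 'system', 'performance']),
-- ]
--
--
-- def _classify(flag):
--     fl = flag.lower()
--     for name, kws in _TABLE:
--         if any(k in fl for k in kws):
--             return name
--     return "Other"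
--
--
-- def _categorize_risk_flags(risk_flags):
--     labels = [_classify(f) for f in risk_flags]
--     result = {}
--     for name in [n for n, _ in _TABLE] + ["Other"]:
--         matched = [f for f, l in zip(risk_flags, labels) if l == name]
--         if matched:
--             result[name] = matched
--     return result
-- ===== Notes on version B (the rewrite author's own statement) =====
-- stated objective: alternative
-- what changed: Replaces the per-flag if/elif cascade appending into a pre-built six-key dict with a keyword table driving a first-match classifier, caching each flag's label once and building the result by one filter pass per category in the fixed order, inserting only non-empty categories.
import Mathlib
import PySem

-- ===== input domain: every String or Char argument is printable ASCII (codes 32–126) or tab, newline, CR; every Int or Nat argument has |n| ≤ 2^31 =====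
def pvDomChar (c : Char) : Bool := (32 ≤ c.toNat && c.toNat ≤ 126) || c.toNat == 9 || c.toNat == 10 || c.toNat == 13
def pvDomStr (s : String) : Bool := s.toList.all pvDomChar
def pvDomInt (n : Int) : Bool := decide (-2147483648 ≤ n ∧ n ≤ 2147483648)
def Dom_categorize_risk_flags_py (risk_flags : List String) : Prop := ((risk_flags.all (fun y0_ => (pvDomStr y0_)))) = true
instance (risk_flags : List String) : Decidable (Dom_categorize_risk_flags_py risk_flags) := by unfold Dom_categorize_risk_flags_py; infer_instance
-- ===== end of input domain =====

-- B replaces A's per-flag if/elif cascade appending into a mutable dict by a keyword table, a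
-- first-match classifier, and one filter pass per category in the fixed order (objective: alternative).

-- ===== PORT A =====
-- dict with six fixed keys; 'categories[k].append(flag)' is modify k [] (· ++ [flag]) (k is always present)
def pvStepA (cats : PySem.Dict String (List String)) (flag : String) : PySem.Dict String (List String) :=
  let fl := PySem.Str.lower flag
  if (["security", "vulnerability", "breach", "attack"].any fun k => PySem.Str.isIn k fl) then
    cats.modify "Security" [] (· ++ [flag])
  else if (["privacy", "personal", "data_protection"].any fun k => PySem.Str.isIn k fl) then
    cats.modify "Privacy" [] (· ++ [flag])
  else if (["compliance", "regulation", "legal", "policy"].any fun k => PySem.Str.isIn k fl) then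
    cats.modify "Compliance" [] (· ++ [flag])
  else if (["financial", "fraud", "money", "payment"].any fun k => PySem.Str.isIn k fl) then
    cats.modify "Financial" [] (· ++ [flag])
  else if (["operational", "system", "performance"].any fun k => PySem.Str.isIn k fl) then
    cats.modify "Operational" [] (· ++ [flag])
  else
    cats.modify "Other" [] (· ++ [flag])

def categorize_risk_flags_py (risk_flags : List String) : List (String × List String) :=
  let categories : PySem.Dict String (List String) :=
    PySem.Dict.mk [("Security", []), ("Privacy", []), ("Compliance", []),
                   ("Financial", []), ("Operational", []), ("Other", [])]
  let final := risk_flags.foldl pvStepA categories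
  -- {k: v for k, v in categories.items() if v} (keys already distinct)
  final.items.filter (fun kv => !kv.2.isEmpty)

-- ===== PORT B =====
def pvTable : List (String × List String) :=
  [("Security", ["security", "vulnerability", "breach", "attack"]),
   ("Privacy", ["privacy", "personal", "data_protection"]),
   ("Compliance", ["compliance", "regulation", "legal", "policy"]),
   ("Financial", ["financial", "fraud", "money", "payment"]),
   ("Operational", ["operational", "system", "performance"])]

def pvClassifyGo (fl : String) : List (String × List String) → String
  | [] => "Other"
  | (name, kws) :: rest =>
      if kws.any (fun k => PySem.Str.isIn k fl) then name else pvClassifyGo fl rest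

def pvClassify (flag : String) : String := pvClassifyGo (PySem.Str.lower flag) pvTable

-- 'result[name] = matched' on a fresh distinct key appends (name, matched) to the items
def categorize_risk_flags_py_alt (risk_flags : List String) : List (String × List String) :=
  let labels := risk_flags.map pvClassify
  (pvTable.map (·.1) ++ ["Other"]).foldl (fun result name =>
    let matched := ((risk_flags.zip labels).filter (fun fl => fl.2 == name)).map (·.1)
    if matched.isEmpty then result else result ++ [(name, matched)]) []

-- ===== PRECONDITION & SPEC =====
def Spec_categorize_risk_flags_py (risk_flags : List String) (out : List (String × List String)) : Prop := out = categorize_risk_flags_py_alt risk_flags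
instance (risk_flags : List String) (out : List (String × List String)) : Decidable (Spec_categorize_risk_flags_py risk_flags out) := by unfold Spec_categorize_risk_flags_py; infer_instance

-- ===== CLAIM (what is proved, stated in full; the proofs are below) =====
def Claim_equal_categorize_risk_flags_py : Prop := ∀ (risk_flags : List String), Dom_categorize_risk_flags_py risk_flags → Spec_categorize_risk_flags_py risk_flags (categorize_risk_flags_py risk_flags)

-- ===== LEMMAS AND PROOFS =====

-- the six dict-modify facts on the literal six-key dict
theorem pv_step1 (s p c f o x : List String) (g : String) :
    (PySem.Dict.mk [("Security", s), ("Privacy", p), ("Compliance", c), ("Financial", f), ("Operational", o), ("Other", x)]).modify "Security" [] (· ++ [g]) =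
    PySem.Dict.mk [("Security", s ++ [g]), ("Privacy", p), ("Compliance", c), ("Financial", f), ("Operational", o), ("Other", x)] := by
  simp [PySem.Dict.modify, PySem.Dict.getD, PySem.Dict.get?, PySem.Dict.insert]

theorem pv_step2 (s p c f o x : List String) (g : String) :
    (PySem.Dict.mk [("Security", s), ("Privacy", p), ("Compliance", c), ("Financial", f), ("Operational", o), ("Other", x)]).modify "Privacy" [] (· ++ [g]) =
    PySem.Dict.mk [("Security", s), ("Privacy", p ++ [g]), ("Compliance", c), ("Financial", f), ("Operational", o), ("Other", x)] := by
  simp [PySem.Dict.modify, PySem.Dict.getD, PySem.Dict.get?, PySem.Dict.insert]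

theorem pv_step3 (s p c f o x : List String) (g : String) :
    (PySem.Dict.mk [("Security", s), ("Privacy", p), ("Compliance", c), ("Financial", f), ("Operational", o), ("Other", x)]).modify "Compliance" [] (· ++ [g]) =
    PySem.Dict.mk [("Security", s), ("Privacy", p), ("Compliance", c ++ [g]), ("Financial", f), ("Operational", o), ("Other", x)] := by
  simp [PySem.Dict.modify, PySem.Dict.getD, PySem.Dict.get?, PySem.Dict.insert]

theorem pv_step4 (s p c f o x : List String) (g : String) :
    (PySem.Dict.mk [("Security", s), ("Privacy", p), ("Compliance", c), ("Financial", f), ("Operational", o), ("Other", x)]).modify "Financial" [] (· ++ [g]) =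
    PySem.Dict.mk [("Security", s), ("Privacy", p), ("Compliance", c), ("Financial", f ++ [g]), ("Operational", o), ("Other", x)] := by
  simp [PySem.Dict.modify, PySem.Dict.getD, PySem.Dict.get?, PySem.Dict.insert]

theorem pv_step5 (s p c f o x : List String) (g : String) :
    (PySem.Dict.mk [("Security", s), ("Privacy", p), ("Compliance", c), ("Financial", f), ("Operational", o), ("Other", x)]).modify "Operational" [] (· ++ [g]) =
    PySem.Dict.mk [("Security", s), ("Privacy", p), ("Compliance", c), ("Financial", f), ("Operational", o ++ [g]), ("Other", x)] := by
  simp [PySem.Dict.modify, PySem.Dict.getD, PySem.Dict.get?, PySem.Dict.insert]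

theorem pv_step6 (s p c f o x : List String) (g : String) :
    (PySem.Dict.mk [("Security", s), ("Privacy", p), ("Compliance", c), ("Financial", f), ("Operational", o), ("Other", x)]).modify "Other" [] (· ++ [g]) =
    PySem.Dict.mk [("Security", s), ("Privacy", p), ("Compliance", c), ("Financial", f), ("Operational", o), ("Other", x ++ [g])] := by
  simp [PySem.Dict.modify, PySem.Dict.getD, PySem.Dict.get?, PySem.Dict.insert]

-- A's loop body on the six-key dict appends g to exactly the category pvClassify picks
set_option maxHeartbeats 2000000 in
theorem pvStepA_mk (s p c f o x : List String) (g : String) :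
    pvStepA (PySem.Dict.mk [("Security", s), ("Privacy", p), ("Compliance", c), ("Financial", f), ("Operational", o), ("Other", x)]) g =
    PySem.Dict.mk
      [("Security", if pvClassify g == "Security" then s ++ [g] else s),
       ("Privacy", if pvClassify g == "Privacy" then p ++ [g] else p),
       ("Compliance", if pvClassify g == "Compliance" then c ++ [g] else c),
       ("Financial", if pvClassify g == "Financial" then f ++ [g] else f),
       ("Operational", if pvClassify g == "Operational" then o ++ [g] else o),
       ("Other", if pvClassify g == "Other" then x ++ [g] else x)] := by
  simp only [pvStepA, pvClassify, pvTable, pvClassifyGo]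
  split_ifs <;> simp_all [pv_step1, pv_step2, pv_step3, pv_step4, pv_step5, pv_step6]

-- B's cached-label filter is the direct per-category filter
theorem pv_zip_filter (rf : List String) (name : String) :
    ((rf.zip (rf.map pvClassify)).filter (fun fl => fl.2 == name)).map (·.1) =
    rf.filter (fun f => pvClassify f == name) := by
  induction rf with
  | nil => simp
  | cons hd tl ih =>
    simp only [List.map_cons, List.zip_cons_cons, List.filter_cons]
    by_cases h : (pvClassify hd == name) = true <;> simp [h, ih]

-- A's loop, started on the six-key literal dict, lands on the six per-category filters
theorem pv_foldA (flags : List String) (s p c f o x : List String) :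
    flags.foldl pvStepA
      (PySem.Dict.mk [("Security", s), ("Privacy", p), ("Compliance", c),
                      ("Financial", f), ("Operational", o), ("Other", x)]) =
    PySem.Dict.mk
      [("Security", s ++ flags.filter (fun g => pvClassify g == "Security")),
       ("Privacy", p ++ flags.filter (fun g => pvClassify g == "Privacy")),
       ("Compliance", c ++ flags.filter (fun g => pvClassify g == "Compliance")),
       ("Financial", f ++ flags.filter (fun g => pvClassify g == "Financial")),
       ("Operational", o ++ flags.filter (fun g => pvClassify g == "Operational")),
       ("Other", x ++ flags.filter (fun g => pvClassify g == "Other"))] := by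
  induction flags generalizing s p c f o x with
  | nil => simp
  | cons hd tl ih =>
    rw [List.foldl_cons, pvStepA_mk, ih]
    simp only [List.filter_cons]
    split_ifs <;> simp_all

-- ===== VERDICT (by name: the statement is the Claim_ definition above) =====
theorem categorize_risk_flags_py_spec : Claim_equal_categorize_risk_flags_py := by
  intro rf _
  show categorize_risk_flags_py rf = categorize_risk_flags_py_alt rf
  simp only [categorize_risk_flags_py, categorize_risk_flags_py_alt]
  rw [pv_foldA]
  simp only [pv_zip_filter, pvTable, List.map, List.cons_append, List.nil_append,
    List.foldl_cons, List.foldl_nil, List.filter_cons, List.filter_nil]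
  by_cases e1 : (rf.filter (fun g => pvClassify g == "Security")).isEmpty <;>
  by_cases e2 : (rf.filter (fun g => pvClassify g == "Privacy")).isEmpty <;>
  by_cases e3 : (rf.filter (fun g => pvClassify g == "Compliance")).isEmpty <;>
  by_cases e4 : (rf.filter (fun g => pvClassify g == "Financial")).isEmpty <;>
  by_cases e5 : (rf.filter (fun g => pvClassify g == "Operational")).isEmpty <;>
  by_cases e6 : (rf.filter (fun g => pvClassify g == "Other")).isEmpty <;>
  simp [e1, e2, e3, e4, e5, e6]
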